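-- pv_equiv track=rewrite | github.com/scptea/Scrutinizer-Testing | processdata_Avrg.py | process_data
-- ===== SOURCE A (Python) =====
-- def process_data(data):
--     result = []
--     for value in data:
--         if value > 10:
--             result.append(value * 2)
--         else:
--             result.append(value)
--         if value < 0:  # This condition doesn't make sense here
--             return None
--     return result
-- ===== SOURCE B (Python) =====
-- def process_data(data):
--     data = list(data)
--     if any(v < 0 for v in data):
--         return None
--     return [v * 2 if v > 10 else v for v in data]
-- ===== Notes on version B (the rewrite author's own statement) =====
-- stated objective: simpler
-- what changed: A's single interleaved loop (build-then-discard on a negative) is split into an any() negative check and a separate list-comprehension mapping pass.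
import Mathlib
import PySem

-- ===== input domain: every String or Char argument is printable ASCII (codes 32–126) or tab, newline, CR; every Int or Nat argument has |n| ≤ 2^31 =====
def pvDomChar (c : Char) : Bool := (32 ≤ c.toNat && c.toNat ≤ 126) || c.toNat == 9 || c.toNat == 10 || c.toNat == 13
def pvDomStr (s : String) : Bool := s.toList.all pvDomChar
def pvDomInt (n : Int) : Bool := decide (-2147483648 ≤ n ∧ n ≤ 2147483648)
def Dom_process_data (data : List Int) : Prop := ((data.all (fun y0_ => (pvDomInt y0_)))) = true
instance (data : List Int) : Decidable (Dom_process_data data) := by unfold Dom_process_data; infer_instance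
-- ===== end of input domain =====

-- B replaces A's single interleaved loop by a negative-detection pass plus a separate mapping pass (simpler).

-- ===== PORT A =====
-- A: one loop, appending to result, returning None as soon as a negative is seen.
def process_data_loop (result : List Int) : List Int → Option (List Int)
  | [] => some result
  | value :: rest =>
      let result := if value > 10 then result ++ [value * 2] else result ++ [value]
      if value < 0 then none else process_data_loop result rest

def process_data (data : List Int) : Option (List Int) :=
  process_data_loop [] data

-- ===== PORT B =====
def process_data_alt (data : List Int) : Option (List Int) :=
  if data.any (fun v => v < 0) then none
  else some (data.map (fun v => if v > 10 then v * 2 else v))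

-- ===== PRECONDITION & SPEC =====
def Spec_process_data (data : List Int) (out : Option (List Int)) : Prop := out = process_data_alt data
instance (data : List Int) (out : Option (List Int)) : Decidable (Spec_process_data data out) := by unfold Spec_process_data; infer_instance

-- ===== CLAIM (what is proved, stated in full; the proofs are below) =====
def Claim_equal_process_data : Prop := ∀ (data : List Int), Dom_process_data data → Spec_process_data data (process_data data)

-- ===== LEMMAS AND PROOFS =====
-- A's accumulator never affects whether None is returned; characterize the loop.
theorem process_data_loop_eq (data acc : List Int) :
    process_data_loop acc data =
      if data.any (fun v => v < 0) then none
      else some (acc ++ data.map (fun v => if v > 10 then v * 2 else v)) := by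
  induction data generalizing acc with
  | nil => simp [process_data_loop]
  | cons v rest ih =>
      simp only [process_data_loop, List.any_cons, List.map_cons]
      by_cases hneg : v < 0
      · simp [hneg]
      · by_cases hgt : v > 10 <;> simp [hneg, hgt, ih]

-- ===== VERDICT (by name: the statement is the Claim_ definition above) =====
theorem process_data_spec : Claim_equal_process_data := by
  intro data _
  show process_data data = process_data_alt data
  simp [process_data, process_data_alt, process_data_loop_eq]
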